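-- pv_equiv track=rewrite | github.com/akde/recycle | recycle.py | extFeature_carton
-- ===== SOURCE A (Python) =====
-- def extFeature_carton(inp_arr):
--     f1 = []
--     f2 = []
--     f3 = []
--     f4 = []
--     f5 = []
--     f6 = []
--     f7 = []
--     f8 = []
--     f9 = []
--     f10 = []
--     f11 = []
--     f12 = []
--     f13 = []
--     f14 = []
--     f15 = []
--     f16 = []
--     f17 = []
--     f18 = []
--     f19 = []
--     f20 = []
--     f21 = []
--     f22 = []
--     f23 = []
--     f24 = []
--     f25 = []
--
--     for ctr in range(0, len(inp_arr) - 25):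
--         f1.append(-inp_arr[ctr + 1] + inp_arr[ctr])
--         f2.append(-inp_arr[ctr + 2] + inp_arr[ctr])
--         f3.append(-inp_arr[ctr + 3] + inp_arr[ctr])
--         f4.append(-inp_arr[ctr + 4] + inp_arr[ctr])
--         f5.append(-inp_arr[ctr + 5] + inp_arr[ctr])
--         f6.append(-inp_arr[ctr + 6] + inp_arr[ctr])
--         f7.append(-inp_arr[ctr + 7] + inp_arr[ctr])
--         f8.append(-inp_arr[ctr + 8] + inp_arr[ctr])
--         f9.append(-inp_arr[ctr + 9] + inp_arr[ctr])
--         f10.append(-inp_arr[ctr + 10] + inp_arr[ctr])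
--         f11.append(-inp_arr[ctr + 11] + inp_arr[ctr])
--         f12.append(-inp_arr[ctr + 12] + inp_arr[ctr])
--         f13.append(-inp_arr[ctr + 13] + inp_arr[ctr])
--         f14.append(-inp_arr[ctr + 14] + inp_arr[ctr])
--         f15.append(-inp_arr[ctr + 15] + inp_arr[ctr])
--         f16.append(-inp_arr[ctr + 16] + inp_arr[ctr])
--         f17.append(-inp_arr[ctr + 17] + inp_arr[ctr])
--         f18.append(-inp_arr[ctr + 18] + inp_arr[ctr])
--         f19.append(-inp_arr[ctr + 19] + inp_arr[ctr])
--         f20.append(-inp_arr[ctr + 20] + inp_arr[ctr])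
--         f21.append(-inp_arr[ctr + 21] + inp_arr[ctr])
--         f22.append(-inp_arr[ctr + 22] + inp_arr[ctr])
--         f23.append(-inp_arr[ctr + 23] + inp_arr[ctr])
--         f24.append(-inp_arr[ctr + 24] + inp_arr[ctr])
--         f25.append(-inp_arr[ctr + 25] + inp_arr[ctr])
--
--     return f1, f2, f3, f4, f5, f6, f7, f8, f9, f10, f11, f12, f13, f14, f15, f16, f17, f18, f19, f20, f21, f22, f23, f24, f25
-- ===== SOURCE B (Python) =====
-- def extFeature_carton(inp_arr):
--     # Incremental scheme: precompute the first-difference array d[j] = a[j] - a[j+1];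
--     # then each lag-k feature list is the lag-(k-1) list plus a shifted column of d,
--     # since a[i] - a[i+k] = (a[i] - a[i+k-1]) + d[i+k-1].
--     n = len(inp_arr)
--     m = n - 25
--     d = [inp_arr[j] - inp_arr[j + 1] for j in range(n - 1)]
--
--     def next_lag(prev, k):
--         return [prev[i] + d[i + k - 1] for i in range(m)]
--
--     f1 = next_lag([0] * m, 1)
--     f2 = next_lag(f1, 2)
--     f3 = next_lag(f2, 3)
--     f4 = next_lag(f3, 4)
--     f5 = next_lag(f4, 5)
--     f6 = next_lag(f5, 6)
--     f7 = next_lag(f6, 7)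
--     f8 = next_lag(f7, 8)
--     f9 = next_lag(f8, 9)
--     f10 = next_lag(f9, 10)
--     f11 = next_lag(f10, 11)
--     f12 = next_lag(f11, 12)
--     f13 = next_lag(f12, 13)
--     f14 = next_lag(f13, 14)
--     f15 = next_lag(f14, 15)
--     f16 = next_lag(f15, 16)
--     f17 = next_lag(f16, 17)
--     f18 = next_lag(f17, 18)
--     f19 = next_lag(f18, 19)
--     f20 = next_lag(f19, 20)
--     f21 = next_lag(f20, 21)
--     f22 = next_lag(f21, 22)
--     f23 = next_lag(f22, 23)
--     f24 = next_lag(f23, 24)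
--     f25 = next_lag(f24, 25)
--     return f1, f2, f3, f4, f5, f6, f7, f8, f9, f10, f11, f12, f13, f14, f15, f16, f17, f18, f19, f20, f21, f22, f23, f24, f25
-- ===== Notes on version B (the rewrite author's own statement) =====
-- stated objective: alternative
-- what changed: A computes each lagged difference a[i]-a[i+k] directly in one pass that fills 25 accumulators; B precomputes the first-difference array d[j]=a[j]-a[j+1] once and derives each lag-k list incrementally from the lag-(k-1) list by adding a shifted column of d (telescoping a[i]-a[i+k] = (a[i]-a[i+k-1]) + d[i+k-1]), never reading a[i+k] itself.
import Mathlib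
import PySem

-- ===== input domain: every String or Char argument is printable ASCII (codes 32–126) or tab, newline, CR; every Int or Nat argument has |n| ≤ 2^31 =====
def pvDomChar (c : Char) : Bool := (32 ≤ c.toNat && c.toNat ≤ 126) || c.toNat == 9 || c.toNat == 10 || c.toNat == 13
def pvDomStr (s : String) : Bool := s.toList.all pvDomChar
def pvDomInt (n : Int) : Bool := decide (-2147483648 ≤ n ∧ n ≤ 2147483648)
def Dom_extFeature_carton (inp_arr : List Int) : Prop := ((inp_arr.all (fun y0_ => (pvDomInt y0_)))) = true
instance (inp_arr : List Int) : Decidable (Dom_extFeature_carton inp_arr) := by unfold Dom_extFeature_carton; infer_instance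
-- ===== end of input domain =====

-- B replaces A's direct per-index computation of all 25 lagged differences by a precomputed
-- first-difference array from which each lag's list is derived incrementally from the previous lag
-- (objective: alternative; same asymptotic cost).

-- ===== PORT A =====
-- state: the 25 accumulator lists f1..f25; one loop step appends one lagged difference to each
def pvStepA (inp_arr : List Int) (s : List Int × List Int × List Int × List Int × List Int × List Int × List Int × List Int × List Int × List Int × List Int × List Int × List Int × List Int × List Int × List Int × List Int × List Int × List Int × List Int × List Int × List Int × List Int × List Int × List Int) (ctr : Int) : List Int × List Int × List Int × List Int × List Int × List Int × List Int × List Int × List Int × List Int × List Int × List Int × List Int × List Int × List Int × List Int × List Int × List Int × List Int × List Int × List Int × List Int × List Int × List Int × List Int :=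
  (s.1 ++ [-(PySem.List.pyGetD inp_arr (ctr + 1) 0) + PySem.List.pyGetD inp_arr ctr 0],
   s.2.1 ++ [-(PySem.List.pyGetD inp_arr (ctr + 2) 0) + PySem.List.pyGetD inp_arr ctr 0],
   s.2.2.1 ++ [-(PySem.List.pyGetD inp_arr (ctr + 3) 0) + PySem.List.pyGetD inp_arr ctr 0],
   s.2.2.2.1 ++ [-(PySem.List.pyGetD inp_arr (ctr + 4) 0) + PySem.List.pyGetD inp_arr ctr 0],
   s.2.2.2.2.1 ++ [-(PySem.List.pyGetD inp_arr (ctr + 5) 0) + PySem.List.pyGetD inp_arr ctr 0],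
   s.2.2.2.2.2.1 ++ [-(PySem.List.pyGetD inp_arr (ctr + 6) 0) + PySem.List.pyGetD inp_arr ctr 0],
   s.2.2.2.2.2.2.1 ++ [-(PySem.List.pyGetD inp_arr (ctr + 7) 0) + PySem.List.pyGetD inp_arr ctr 0],
   s.2.2.2.2.2.2.2.1 ++ [-(PySem.List.pyGetD inp_arr (ctr + 8) 0) + PySem.List.pyGetD inp_arr ctr 0],
   s.2.2.2.2.2.2.2.2.1 ++ [-(PySem.List.pyGetD inp_arr (ctr + 9) 0) + PySem.List.pyGetD inp_arr ctr 0],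
   s.2.2.2.2.2.2.2.2.2.1 ++ [-(PySem.List.pyGetD inp_arr (ctr + 10) 0) + PySem.List.pyGetD inp_arr ctr 0],
   s.2.2.2.2.2.2.2.2.2.2.1 ++ [-(PySem.List.pyGetD inp_arr (ctr + 11) 0) + PySem.List.pyGetD inp_arr ctr 0],
   s.2.2.2.2.2.2.2.2.2.2.2.1 ++ [-(PySem.List.pyGetD inp_arr (ctr + 12) 0) + PySem.List.pyGetD inp_arr ctr 0],
   s.2.2.2.2.2.2.2.2.2.2.2.2.1 ++ [-(PySem.List.pyGetD inp_arr (ctr + 13) 0) + PySem.List.pyGetD inp_arr ctr 0],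
   s.2.2.2.2.2.2.2.2.2.2.2.2.2.1 ++ [-(PySem.List.pyGetD inp_arr (ctr + 14) 0) + PySem.List.pyGetD inp_arr ctr 0],
   s.2.2.2.2.2.2.2.2.2.2.2.2.2.2.1 ++ [-(PySem.List.pyGetD inp_arr (ctr + 15) 0) + PySem.List.pyGetD inp_arr ctr 0],
   s.2.2.2.2.2.2.2.2.2.2.2.2.2.2.2.1 ++ [-(PySem.List.pyGetD inp_arr (ctr + 16) 0) + PySem.List.pyGetD inp_arr ctr 0],
   s.2.2.2.2.2.2.2.2.2.2.2.2.2.2.2.2.1 ++ [-(PySem.List.pyGetD inp_arr (ctr + 17) 0) + PySem.List.pyGetD inp_arr ctr 0],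
   s.2.2.2.2.2.2.2.2.2.2.2.2.2.2.2.2.2.1 ++ [-(PySem.List.pyGetD inp_arr (ctr + 18) 0) + PySem.List.pyGetD inp_arr ctr 0],
   s.2.2.2.2.2.2.2.2.2.2.2.2.2.2.2.2.2.2.1 ++ [-(PySem.List.pyGetD inp_arr (ctr + 19) 0) + PySem.List.pyGetD inp_arr ctr 0],
   s.2.2.2.2.2.2.2.2.2.2.2.2.2.2.2.2.2.2.2.1 ++ [-(PySem.List.pyGetD inp_arr (ctr + 20) 0) + PySem.List.pyGetD inp_arr ctr 0],
   s.2.2.2.2.2.2.2.2.2.2.2.2.2.2.2.2.2.2.2.2.1 ++ [-(PySem.List.pyGetD inp_arr (ctr + 21) 0) + PySem.List.pyGetD inp_arr ctr 0],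
   s.2.2.2.2.2.2.2.2.2.2.2.2.2.2.2.2.2.2.2.2.2.1 ++ [-(PySem.List.pyGetD inp_arr (ctr + 22) 0) + PySem.List.pyGetD inp_arr ctr 0],
   s.2.2.2.2.2.2.2.2.2.2.2.2.2.2.2.2.2.2.2.2.2.2.1 ++ [-(PySem.List.pyGetD inp_arr (ctr + 23) 0) + PySem.List.pyGetD inp_arr ctr 0],
   s.2.2.2.2.2.2.2.2.2.2.2.2.2.2.2.2.2.2.2.2.2.2.2.1 ++ [-(PySem.List.pyGetD inp_arr (ctr + 24) 0) + PySem.List.pyGetD inp_arr ctr 0],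
   s.2.2.2.2.2.2.2.2.2.2.2.2.2.2.2.2.2.2.2.2.2.2.2.2 ++ [-(PySem.List.pyGetD inp_arr (ctr + 25) 0) + PySem.List.pyGetD inp_arr ctr 0])

def extFeature_carton (inp_arr : List Int) : List Int × List Int × List Int × List Int × List Int × List Int × List Int × List Int × List Int × List Int × List Int × List Int × List Int × List Int × List Int × List Int × List Int × List Int × List Int × List Int × List Int × List Int × List Int × List Int × List Int :=
  List.foldl (pvStepA inp_arr) ([], [], [], [], [], [], [], [], [], [], [], [], [], [], [], [], [], [], [], [], [], [], [], [], []) (PySem.List.pyRange 0 ((inp_arr.length : Int) - 25) 1)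

-- ===== PORT B =====
-- first differences: d[j] = a[j] - a[j+1]
def pvD (a : List Int) : List Int :=
  (PySem.List.pyRange 0 ((a.length : Int) - 1) 1).map
    (fun j => PySem.List.pyGetD a j 0 - PySem.List.pyGetD a (j + 1) 0)

-- next_lag of Source B: the lag-k list from the lag-(k-1) list, adding the shifted column of d
def pvNextLag (d : List Int) (m : Int) (prev : List Int) (k : Int) : List Int :=
  (PySem.List.pyRange 0 m 1).map
    (fun i => PySem.List.pyGetD prev i 0 + PySem.List.pyGetD d (i + k - 1) 0)

def extFeature_carton_alt (inp_arr : List Int) : List Int × List Int × List Int × List Int × List Int × List Int × List Int × List Int × List Int × List Int × List Int × List Int × List Int × List Int × List Int × List Int × List Int × List Int × List Int × List Int × List Int × List Int × List Int × List Int × List Int :=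
  let m : Int := (inp_arr.length : Int) - 25
  let d := pvD inp_arr
  -- [0] * m : empty for m ≤ 0, exactly Int.toNat's clamping
  let f1 := pvNextLag d m (List.replicate m.toNat 0) 1
  let f2 := pvNextLag d m f1 2
  let f3 := pvNextLag d m f2 3
  let f4 := pvNextLag d m f3 4
  let f5 := pvNextLag d m f4 5
  let f6 := pvNextLag d m f5 6
  let f7 := pvNextLag d m f6 7
  let f8 := pvNextLag d m f7 8
  let f9 := pvNextLag d m f8 9
  let f10 := pvNextLag d m f9 10
  let f11 := pvNextLag d m f10 11
  let f12 := pvNextLag d m f11 12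
  let f13 := pvNextLag d m f12 13
  let f14 := pvNextLag d m f13 14
  let f15 := pvNextLag d m f14 15
  let f16 := pvNextLag d m f15 16
  let f17 := pvNextLag d m f16 17
  let f18 := pvNextLag d m f17 18
  let f19 := pvNextLag d m f18 19
  let f20 := pvNextLag d m f19 20
  let f21 := pvNextLag d m f20 21
  let f22 := pvNextLag d m f21 22
  let f23 := pvNextLag d m f22 23
  let f24 := pvNextLag d m f23 24
  let f25 := pvNextLag d m f24 25
  (f1, f2, f3, f4, f5, f6, f7, f8, f9, f10, f11, f12, f13, f14, f15, f16, f17, f18, f19, f20, f21, f22, f23, f24, f25)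

-- ===== PRECONDITION & SPEC =====
def Spec_extFeature_carton (inp_arr : List Int) (out : List Int × List Int × List Int × List Int × List Int × List Int × List Int × List Int × List Int × List Int × List Int × List Int × List Int × List Int × List Int × List Int × List Int × List Int × List Int × List Int × List Int × List Int × List Int × List Int × List Int) : Prop := out = extFeature_carton_alt inp_arr
instance (inp_arr : List Int) (out : List Int × List Int × List Int × List Int × List Int × List Int × List Int × List Int × List Int × List Int × List Int × List Int × List Int × List Int × List Int × List Int × List Int × List Int × List Int × List Int × List Int × List Int × List Int × List Int × List Int) : Decidable (Spec_extFeature_carton inp_arr out) := by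
  unfold Spec_extFeature_carton
  haveI : DecidableEq (List Int × List Int) := instDecidableEqProd
  haveI : DecidableEq (List Int × List Int × List Int) := instDecidableEqProd
  haveI : DecidableEq (List Int × List Int × List Int × List Int) := instDecidableEqProd
  haveI : DecidableEq (List Int × List Int × List Int × List Int × List Int) := instDecidableEqProd
  haveI : DecidableEq (List Int × List Int × List Int × List Int × List Int × List Int) := instDecidableEqProd
  haveI : DecidableEq (List Int × List Int × List Int × List Int × List Int × List Int × List Int) := instDecidableEqProd
  haveI : DecidableEq (List Int × List Int × List Int × List Int × List Int × List Int × List Int × List Int) := instDecidableEqProd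
  haveI : DecidableEq (List Int × List Int × List Int × List Int × List Int × List Int × List Int × List Int × List Int) := instDecidableEqProd
  haveI : DecidableEq (List Int × List Int × List Int × List Int × List Int × List Int × List Int × List Int × List Int × List Int) := instDecidableEqProd
  haveI : DecidableEq (List Int × List Int × List Int × List Int × List Int × List Int × List Int × List Int × List Int × List Int × List Int) := instDecidableEqProd
  haveI : DecidableEq (List Int × List Int × List Int × List Int × List Int × List Int × List Int × List Int × List Int × List Int × List Int × List Int) := instDecidableEqProd
  haveI : DecidableEq (List Int × List Int × List Int × List Int × List Int × List Int × List Int × List Int × List Int × List Int × List Int × List Int × List Int) := instDecidableEqProd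
  haveI : DecidableEq (List Int × List Int × List Int × List Int × List Int × List Int × List Int × List Int × List Int × List Int × List Int × List Int × List Int × List Int) := instDecidableEqProd
  haveI : DecidableEq (List Int × List Int × List Int × List Int × List Int × List Int × List Int × List Int × List Int × List Int × List Int × List Int × List Int × List Int × List Int) := instDecidableEqProd
  haveI : DecidableEq (List Int × List Int × List Int × List Int × List Int × List Int × List Int × List Int × List Int × List Int × List Int × List Int × List Int × List Int × List Int × List Int) := instDecidableEqProd
  haveI : DecidableEq (List Int × List Int × List Int × List Int × List Int × List Int × List Int × List Int × List Int × List Int × List Int × List Int × List Int × List Int × List Int × List Int × List Int) := instDecidableEqProd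
  haveI : DecidableEq (List Int × List Int × List Int × List Int × List Int × List Int × List Int × List Int × List Int × List Int × List Int × List Int × List Int × List Int × List Int × List Int × List Int × List Int) := instDecidableEqProd
  haveI : DecidableEq (List Int × List Int × List Int × List Int × List Int × List Int × List Int × List Int × List Int × List Int × List Int × List Int × List Int × List Int × List Int × List Int × List Int × List Int × List Int) := instDecidableEqProd
  haveI : DecidableEq (List Int × List Int × List Int × List Int × List Int × List Int × List Int × List Int × List Int × List Int × List Int × List Int × List Int × List Int × List Int × List Int × List Int × List Int × List Int × List Int) := instDecidableEqProd
  haveI : DecidableEq (List Int × List Int × List Int × List Int × List Int × List Int × List Int × List Int × List Int × List Int × List Int × List Int × List Int × List Int × List Int × List Int × List Int × List Int × List Int × List Int × List Int) := instDecidableEqProd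
  haveI : DecidableEq (List Int × List Int × List Int × List Int × List Int × List Int × List Int × List Int × List Int × List Int × List Int × List Int × List Int × List Int × List Int × List Int × List Int × List Int × List Int × List Int × List Int × List Int) := instDecidableEqProd
  haveI : DecidableEq (List Int × List Int × List Int × List Int × List Int × List Int × List Int × List Int × List Int × List Int × List Int × List Int × List Int × List Int × List Int × List Int × List Int × List Int × List Int × List Int × List Int × List Int × List Int) := instDecidableEqProd
  haveI : DecidableEq (List Int × List Int × List Int × List Int × List Int × List Int × List Int × List Int × List Int × List Int × List Int × List Int × List Int × List Int × List Int × List Int × List Int × List Int × List Int × List Int × List Int × List Int × List Int × List Int) := instDecidableEqProd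
  haveI : DecidableEq (List Int × List Int × List Int × List Int × List Int × List Int × List Int × List Int × List Int × List Int × List Int × List Int × List Int × List Int × List Int × List Int × List Int × List Int × List Int × List Int × List Int × List Int × List Int × List Int × List Int) := instDecidableEqProd
  infer_instance

-- ===== CLAIM (what is proved, stated in full; the proofs are below) =====
def Claim_equal_extFeature_carton : Prop := ∀ (inp_arr : List Int), Dom_extFeature_carton inp_arr → Spec_extFeature_carton inp_arr (extFeature_carton inp_arr)

-- ===== LEMMAS AND PROOFS =====

-- the lag-k difference list, common normal form of both programs' lists
def pvLagMap (a : List Int) (k : Int) : List Int :=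
  (PySem.List.pyRange 0 ((a.length : Int) - 25) 1).map
    (fun ctr => PySem.List.pyGetD a ctr 0 - PySem.List.pyGetD a (ctr + k) 0)

theorem pvFoldA (inp_arr : List Int) (l : List Int) :
    ∀ a1 a2 a3 a4 a5 a6 a7 a8 a9 a10 a11 a12 a13 a14 a15 a16 a17 a18 a19 a20 a21 a22 a23 a24 a25 : List Int,
    List.foldl (pvStepA inp_arr) (a1, a2, a3, a4, a5, a6, a7, a8, a9, a10, a11, a12, a13, a14, a15, a16, a17, a18, a19, a20, a21, a22, a23, a24, a25) l =
      (        a1 ++ l.map (fun ctr => -(PySem.List.pyGetD inp_arr (ctr + 1) 0) + PySem.List.pyGetD inp_arr ctr 0),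
        a2 ++ l.map (fun ctr => -(PySem.List.pyGetD inp_arr (ctr + 2) 0) + PySem.List.pyGetD inp_arr ctr 0),
        a3 ++ l.map (fun ctr => -(PySem.List.pyGetD inp_arr (ctr + 3) 0) + PySem.List.pyGetD inp_arr ctr 0),
        a4 ++ l.map (fun ctr => -(PySem.List.pyGetD inp_arr (ctr + 4) 0) + PySem.List.pyGetD inp_arr ctr 0),
        a5 ++ l.map (fun ctr => -(PySem.List.pyGetD inp_arr (ctr + 5) 0) + PySem.List.pyGetD inp_arr ctr 0),
        a6 ++ l.map (fun ctr => -(PySem.List.pyGetD inp_arr (ctr + 6) 0) + PySem.List.pyGetD inp_arr ctr 0),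
        a7 ++ l.map (fun ctr => -(PySem.List.pyGetD inp_arr (ctr + 7) 0) + PySem.List.pyGetD inp_arr ctr 0),
        a8 ++ l.map (fun ctr => -(PySem.List.pyGetD inp_arr (ctr + 8) 0) + PySem.List.pyGetD inp_arr ctr 0),
        a9 ++ l.map (fun ctr => -(PySem.List.pyGetD inp_arr (ctr + 9) 0) + PySem.List.pyGetD inp_arr ctr 0),
        a10 ++ l.map (fun ctr => -(PySem.List.pyGetD inp_arr (ctr + 10) 0) + PySem.List.pyGetD inp_arr ctr 0),
        a11 ++ l.map (fun ctr => -(PySem.List.pyGetD inp_arr (ctr + 11) 0) + PySem.List.pyGetD inp_arr ctr 0),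
        a12 ++ l.map (fun ctr => -(PySem.List.pyGetD inp_arr (ctr + 12) 0) + PySem.List.pyGetD inp_arr ctr 0),
        a13 ++ l.map (fun ctr => -(PySem.List.pyGetD inp_arr (ctr + 13) 0) + PySem.List.pyGetD inp_arr ctr 0),
        a14 ++ l.map (fun ctr => -(PySem.List.pyGetD inp_arr (ctr + 14) 0) + PySem.List.pyGetD inp_arr ctr 0),
        a15 ++ l.map (fun ctr => -(PySem.List.pyGetD inp_arr (ctr + 15) 0) + PySem.List.pyGetD inp_arr ctr 0),
        a16 ++ l.map (fun ctr => -(PySem.List.pyGetD inp_arr (ctr + 16) 0) + PySem.List.pyGetD inp_arr ctr 0),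
        a17 ++ l.map (fun ctr => -(PySem.List.pyGetD inp_arr (ctr + 17) 0) + PySem.List.pyGetD inp_arr ctr 0),
        a18 ++ l.map (fun ctr => -(PySem.List.pyGetD inp_arr (ctr + 18) 0) + PySem.List.pyGetD inp_arr ctr 0),
        a19 ++ l.map (fun ctr => -(PySem.List.pyGetD inp_arr (ctr + 19) 0) + PySem.List.pyGetD inp_arr ctr 0),
        a20 ++ l.map (fun ctr => -(PySem.List.pyGetD inp_arr (ctr + 20) 0) + PySem.List.pyGetD inp_arr ctr 0),
        a21 ++ l.map (fun ctr => -(PySem.List.pyGetD inp_arr (ctr + 21) 0) + PySem.List.pyGetD inp_arr ctr 0),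
        a22 ++ l.map (fun ctr => -(PySem.List.pyGetD inp_arr (ctr + 22) 0) + PySem.List.pyGetD inp_arr ctr 0),
        a23 ++ l.map (fun ctr => -(PySem.List.pyGetD inp_arr (ctr + 23) 0) + PySem.List.pyGetD inp_arr ctr 0),
        a24 ++ l.map (fun ctr => -(PySem.List.pyGetD inp_arr (ctr + 24) 0) + PySem.List.pyGetD inp_arr ctr 0),
        a25 ++ l.map (fun ctr => -(PySem.List.pyGetD inp_arr (ctr + 25) 0) + PySem.List.pyGetD inp_arr ctr 0)) := by
  induction l with
  | nil => intro a1 a2 a3 a4 a5 a6 a7 a8 a9 a10 a11 a12 a13 a14 a15 a16 a17 a18 a19 a20 a21 a22 a23 a24 a25; simp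
  | cons x t ih =>
    intro a1 a2 a3 a4 a5 a6 a7 a8 a9 a10 a11 a12 a13 a14 a15 a16 a17 a18 a19 a20 a21 a22 a23 a24 a25
    simp only [List.foldl_cons, List.map_cons, pvStepA]
    rw [ih]
    simp [List.append_assoc]

-- one Source B step, under a pointwise description of prev as the lag-(k-1) list
theorem pvNextLag_eq (a prev : List Int) (k : Int) (hk : 1 ≤ k) (hk25 : k ≤ 25)
    (hprev : ∀ i : Int, 0 ≤ i → i < (a.length : Int) - 25 →
      PySem.List.pyGetD prev i 0 = PySem.List.pyGetD a i 0 - PySem.List.pyGetD a (i + (k - 1)) 0) :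
    pvNextLag (pvD a) ((a.length : Int) - 25) prev k = pvLagMap a k := by
  unfold pvNextLag pvLagMap
  apply List.map_congr_left
  intro i hi
  rw [PySem.List.mem_pyRange_one] at hi
  rw [hprev i hi.1 hi.2]
  unfold pvD
  rw [PySem.List.pyGetD_map_pyRange_of_nonneg _ _ _ _ (by omega) (by omega)]
  have e1 : i + (k - 1) = i + k - 1 := by ring
  have e2 : i + k - 1 + 1 = i + k := by ring
  rw [e1, e2]
  ring

-- reading the lag map pointwise (to feed the next step's hprev)
theorem pvLagMap_getD (a : List Int) (k i : Int) (h0 : 0 ≤ i) (h1 : i < (a.length : Int) - 25) :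
    PySem.List.pyGetD (pvLagMap a k) i 0 = PySem.List.pyGetD a i 0 - PySem.List.pyGetD a (i + k) 0 := by
  unfold pvLagMap
  exact PySem.List.pyGetD_map_pyRange_of_nonneg _ _ _ _ h0 h1

theorem pvChainStep (a : List Int) (k : Int) (hk : 1 ≤ k) (hk25 : k ≤ 25) :
    pvNextLag (pvD a) ((a.length : Int) - 25) (pvLagMap a (k - 1)) k = pvLagMap a k :=
  pvNextLag_eq a _ k hk hk25 (fun i h0 h1 => pvLagMap_getD a (k - 1) i h0 h1)

theorem pvChainBase (a : List Int) :
    pvNextLag (pvD a) ((a.length : Int) - 25) (List.replicate ((a.length : Int) - 25).toNat 0) 1 = pvLagMap a 1 := by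
  apply pvNextLag_eq a _ 1 (by omega) (by omega)
  intro i h0 h1
  have hrep : PySem.List.pyGetD (List.replicate ((a.length : Int) - 25).toNat (0 : Int)) i 0 = 0 := by
    rw [PySem.List.pyGetD_eq_getElem (xs := List.replicate ((a.length : Int) - 25).toNat (0 : Int)) (i := i) (d := 0) h0 (by simp; omega)]
    simp
  rw [hrep]
  have e : i + (1 - 1 : Int) = i := by ring
  rw [e]
  ring

-- ===== VERDICT (by name: the statement is the Claim_ definition above) =====
theorem extFeature_carton_spec : Claim_equal_extFeature_carton := by
  intro inp_arr _
  unfold Spec_extFeature_carton extFeature_carton extFeature_carton_alt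
  rw [pvFoldA]
  have h1 := pvChainBase inp_arr
  have h2 : pvNextLag (pvD inp_arr) ((inp_arr.length : Int) - 25) (pvLagMap inp_arr 1) 2 = pvLagMap inp_arr 2 := pvChainStep inp_arr 2 (by omega) (by omega)
  have h3 : pvNextLag (pvD inp_arr) ((inp_arr.length : Int) - 25) (pvLagMap inp_arr 2) 3 = pvLagMap inp_arr 3 := pvChainStep inp_arr 3 (by omega) (by omega)
  have h4 : pvNextLag (pvD inp_arr) ((inp_arr.length : Int) - 25) (pvLagMap inp_arr 3) 4 = pvLagMap inp_arr 4 := pvChainStep inp_arr 4 (by omega) (by omega)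
  have h5 : pvNextLag (pvD inp_arr) ((inp_arr.length : Int) - 25) (pvLagMap inp_arr 4) 5 = pvLagMap inp_arr 5 := pvChainStep inp_arr 5 (by omega) (by omega)
  have h6 : pvNextLag (pvD inp_arr) ((inp_arr.length : Int) - 25) (pvLagMap inp_arr 5) 6 = pvLagMap inp_arr 6 := pvChainStep inp_arr 6 (by omega) (by omega)
  have h7 : pvNextLag (pvD inp_arr) ((inp_arr.length : Int) - 25) (pvLagMap inp_arr 6) 7 = pvLagMap inp_arr 7 := pvChainStep inp_arr 7 (by omega) (by omega)
  have h8 : pvNextLag (pvD inp_arr) ((inp_arr.length : Int) - 25) (pvLagMap inp_arr 7) 8 = pvLagMap inp_arr 8 := pvChainStep inp_arr 8 (by omega) (by omega)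
  have h9 : pvNextLag (pvD inp_arr) ((inp_arr.length : Int) - 25) (pvLagMap inp_arr 8) 9 = pvLagMap inp_arr 9 := pvChainStep inp_arr 9 (by omega) (by omega)
  have h10 : pvNextLag (pvD inp_arr) ((inp_arr.length : Int) - 25) (pvLagMap inp_arr 9) 10 = pvLagMap inp_arr 10 := pvChainStep inp_arr 10 (by omega) (by omega)
  have h11 : pvNextLag (pvD inp_arr) ((inp_arr.length : Int) - 25) (pvLagMap inp_arr 10) 11 = pvLagMap inp_arr 11 := pvChainStep inp_arr 11 (by omega) (by omega)
  have h12 : pvNextLag (pvD inp_arr) ((inp_arr.length : Int) - 25) (pvLagMap inp_arr 11) 12 = pvLagMap inp_arr 12 := pvChainStep inp_arr 12 (by omega) (by omega)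
  have h13 : pvNextLag (pvD inp_arr) ((inp_arr.length : Int) - 25) (pvLagMap inp_arr 12) 13 = pvLagMap inp_arr 13 := pvChainStep inp_arr 13 (by omega) (by omega)
  have h14 : pvNextLag (pvD inp_arr) ((inp_arr.length : Int) - 25) (pvLagMap inp_arr 13) 14 = pvLagMap inp_arr 14 := pvChainStep inp_arr 14 (by omega) (by omega)
  have h15 : pvNextLag (pvD inp_arr) ((inp_arr.length : Int) - 25) (pvLagMap inp_arr 14) 15 = pvLagMap inp_arr 15 := pvChainStep inp_arr 15 (by omega) (by omega)
  have h16 : pvNextLag (pvD inp_arr) ((inp_arr.length : Int) - 25) (pvLagMap inp_arr 15) 16 = pvLagMap inp_arr 16 := pvChainStep inp_arr 16 (by omega) (by omega)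
  have h17 : pvNextLag (pvD inp_arr) ((inp_arr.length : Int) - 25) (pvLagMap inp_arr 16) 17 = pvLagMap inp_arr 17 := pvChainStep inp_arr 17 (by omega) (by omega)
  have h18 : pvNextLag (pvD inp_arr) ((inp_arr.length : Int) - 25) (pvLagMap inp_arr 17) 18 = pvLagMap inp_arr 18 := pvChainStep inp_arr 18 (by omega) (by omega)
  have h19 : pvNextLag (pvD inp_arr) ((inp_arr.length : Int) - 25) (pvLagMap inp_arr 18) 19 = pvLagMap inp_arr 19 := pvChainStep inp_arr 19 (by omega) (by omega)
  have h20 : pvNextLag (pvD inp_arr) ((inp_arr.length : Int) - 25) (pvLagMap inp_arr 19) 20 = pvLagMap inp_arr 20 := pvChainStep inp_arr 20 (by omega) (by omega)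
  have h21 : pvNextLag (pvD inp_arr) ((inp_arr.length : Int) - 25) (pvLagMap inp_arr 20) 21 = pvLagMap inp_arr 21 := pvChainStep inp_arr 21 (by omega) (by omega)
  have h22 : pvNextLag (pvD inp_arr) ((inp_arr.length : Int) - 25) (pvLagMap inp_arr 21) 22 = pvLagMap inp_arr 22 := pvChainStep inp_arr 22 (by omega) (by omega)
  have h23 : pvNextLag (pvD inp_arr) ((inp_arr.length : Int) - 25) (pvLagMap inp_arr 22) 23 = pvLagMap inp_arr 23 := pvChainStep inp_arr 23 (by omega) (by omega)
  have h24 : pvNextLag (pvD inp_arr) ((inp_arr.length : Int) - 25) (pvLagMap inp_arr 23) 24 = pvLagMap inp_arr 24 := pvChainStep inp_arr 24 (by omega) (by omega)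
  have h25 : pvNextLag (pvD inp_arr) ((inp_arr.length : Int) - 25) (pvLagMap inp_arr 24) 25 = pvLagMap inp_arr 25 := pvChainStep inp_arr 25 (by omega) (by omega)
  simp only [h1, h2, h3, h4, h5, h6, h7, h8, h9, h10, h11, h12, h13, h14, h15, h16, h17, h18, h19, h20, h21, h22, h23, h24, h25]
  unfold pvLagMap
  have harg : ∀ k : Int,
      (fun ctr => -(PySem.List.pyGetD inp_arr (ctr + k) 0) + PySem.List.pyGetD inp_arr ctr 0)
        = (fun ctr => PySem.List.pyGetD inp_arr ctr 0 - PySem.List.pyGetD inp_arr (ctr + k) 0) :=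
    fun k => funext fun ctr => by ring
  simp only [harg, List.nil_append]
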